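-- pv_equiv track=rewrite | github.com/astorrs276/Python-Programs | Leetle Programs/2025/5-30 Course Schedule.py | solve
-- ===== SOURCE A (Python) =====
-- def solve(num_courses, prerequisites):
--     prereqs = dict()
--     for item in prerequisites:
--         if item[1] not in prereqs:
--             prereqs[item[1]] = []
--         prereqs[item[1]].append(item[0])
--     for key in prereqs:
--         for item in prereqs[key]:
--             if item in prereqs and key in prereqs[item]:
--                 return False
--     return True
-- ===== SOURCE B (Python) =====
-- def solve(num_courses, prerequisites):
--     seen = set()
--     for item in prerequisites:
--         a, b = item[0], item[1]
--         seen.add((a, b))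
--         if (b, a) in seen:
--             return False
--     return True
-- ===== Notes on version B (the rewrite author's own statement) =====
-- stated objective: simpler
-- what changed: A builds a course->prereq-list dict in one loop and then runs a nested scan over the dict to find a reciprocal pair; B does a single streaming pass keeping one set of directed edge tuples, adding each edge and checking for its reverse immediately.
import Mathlib
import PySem

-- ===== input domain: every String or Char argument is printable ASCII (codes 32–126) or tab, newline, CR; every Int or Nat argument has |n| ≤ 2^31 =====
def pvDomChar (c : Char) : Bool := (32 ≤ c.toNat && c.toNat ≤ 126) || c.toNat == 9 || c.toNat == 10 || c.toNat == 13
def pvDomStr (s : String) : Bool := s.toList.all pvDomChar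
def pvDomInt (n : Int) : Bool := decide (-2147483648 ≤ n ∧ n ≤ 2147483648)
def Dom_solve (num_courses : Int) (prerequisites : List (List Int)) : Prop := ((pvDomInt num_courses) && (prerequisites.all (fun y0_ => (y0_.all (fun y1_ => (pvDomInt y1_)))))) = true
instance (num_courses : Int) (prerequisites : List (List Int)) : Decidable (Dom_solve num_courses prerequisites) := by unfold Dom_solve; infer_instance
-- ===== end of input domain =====

-- B replaces A's build-a-dict-then-nested-scan with one streaming pass over the edges
-- keeping a set of seen directed edges (objective: simpler).

-- ===== PORT A =====
-- first loop of A: 'if item[1] not in prereqs: prereqs[item[1]] = []' then append = Dict.modify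
def solveStep (d : PySem.Dict Int (List Int)) (item : List Int) : PySem.Dict Int (List Int) :=
  match PySem.List.pyGet? item 1, PySem.List.pyGet? item 0 with
  | some b, some a => d.modify b [] (fun l => l ++ [a])
  | _, _ => d                                               -- IndexError in Python; excluded by Pre_solve

-- second (nested) loop of A with its early 'return False'
def solveScan (prereqs : PySem.Dict Int (List Int)) : Bool :=
  !(prereqs.items.any (fun kv =>
      kv.2.any (fun item => prereqs.contains item && (prereqs.getD item []).contains kv.1)))

def solve (num_courses : Int) (prerequisites : List (List Int)) : Bool :=
  solveScan (prerequisites.foldl solveStep PySem.Dict.empty)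

-- ===== PORT B =====
def solveAltGo : List (List Int) → PySem.Set (Int × Int) → Bool
  | [], _ => true
  | item :: rest, seen =>
    match PySem.List.pyGet? item 0, PySem.List.pyGet? item 1 with
    | some a, some b =>
      let seen' := PySem.Set.add seen (a, b)
      if PySem.Set.contains seen' (b, a) then false else solveAltGo rest seen'
    | _, _ => true                                            -- IndexError in Python; excluded by Pre_solve

def solve_alt (num_courses : Int) (prerequisites : List (List Int)) : Bool :=
  solveAltGo prerequisites PySem.Set.empty

-- ===== PRECONDITION & SPEC =====
-- Pre_ excludes rows with fewer than two entries, on which both Pythons raise IndexError.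
def Pre_solve (num_courses : Int) (prerequisites : List (List Int)) : Prop :=
  ∀ item ∈ prerequisites, 2 ≤ item.length
instance (num_courses : Int) (prerequisites : List (List Int)) : Decidable (Pre_solve num_courses prerequisites) := by unfold Pre_solve; infer_instance

def pvWitness_solve : Int × List (List Int) := (2, [[0, 1], [1, 0]])

def Spec_solve (num_courses : Int) (prerequisites : List (List Int)) (out : Bool) : Prop := out = solve_alt num_courses prerequisites
instance (num_courses : Int) (prerequisites : List (List Int)) (out : Bool) : Decidable (Spec_solve num_courses prerequisites out) := by unfold Spec_solve; infer_instance

-- ===== CLAIM (what is proved, stated in full; the proofs are below) =====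
def Claim_equal_solve : Prop := ∀ (num_courses : Int) (prerequisites : List (List Int)), Dom_solve num_courses prerequisites → Pre_solve num_courses prerequisites → Spec_solve num_courses prerequisites (solve num_courses prerequisites)

-- ===== LEMMAS AND PROOFS =====

-- the (prereq, course) pairs of the well-formed rows
def pvEdges (ps : List (List Int)) : List (Int × Int) :=
  ps.map (fun it => (it.getD 0 0, it.getD 1 0))

-- "some reciprocal pair of edges exists"
def pvBad (es : List (Int × Int)) : Bool :=
  es.any (fun p => es.contains (p.2, p.1))

theorem pvBad_iff (es : List (Int × Int)) :
    pvBad es = true ↔ ∃ a b, (a, b) ∈ es ∧ (b, a) ∈ es := by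
  simp only [pvBad, List.any_eq_true, List.contains_iff_mem]
  constructor
  · rintro ⟨⟨a, b⟩, h1, h2⟩; exact ⟨a, b, h1, h2⟩
  · rintro ⟨a, b, h1, h2⟩; exact ⟨(a, b), h1, h2⟩

theorem pvGet_row (it : List Int) (h : 2 ≤ it.length) (n : ℕ) (hn : n < 2) :
    PySem.List.pyGet? it (n : Int) = some (it.getD n 0) := by
  have hlt : n < it.length := lt_of_lt_of_le hn h
  rw [PySem.List.pyGet?_natCast, List.getElem?_eq_getElem hlt, List.getD_eq_getElem _ _ hlt]

theorem pvGet_row0 (it : List Int) (h : 2 ≤ it.length) :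
    PySem.List.pyGet? it 0 = some (it.getD 0 0) := by
  have := pvGet_row it h 0 (by norm_num); exact_mod_cast this

theorem pvGet_row1 (it : List Int) (h : 2 ≤ it.length) :
    PySem.List.pyGet? it 1 = some (it.getD 1 0) := by
  have := pvGet_row it h 1 (by norm_num); exact_mod_cast this

theorem solveAltGo_cons (item : List Int) (rest : List (List Int)) (seen : PySem.Set (Int × Int))
    (a b : Int) (h0 : PySem.List.pyGet? item 0 = some a) (h1 : PySem.List.pyGet? item 1 = some b) :
    solveAltGo (item :: rest) seen =
      (if PySem.Set.contains (PySem.Set.add seen (a, b)) (b, a) then false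
       else solveAltGo rest (PySem.Set.add seen (a, b))) := by
  rw [solveAltGo, h0, h1]

-- ===== side B =====

theorem solveAltGo_inv (rest : List (List Int)) :
    ∀ (pre : List (Int × Int)) (seen : PySem.Set (Int × Int)),
    (∀ it ∈ rest, 2 ≤ it.length) →
    (∀ x, x ∈ seen ↔ x ∈ pre) →
    pvBad pre = false →
    solveAltGo rest seen = !pvBad (pre ++ pvEdges rest) := by
  induction rest with
  | nil =>
    intro pre seen _ _ hpre
    simp [solveAltGo, pvEdges, hpre]
  | cons item rest ih =>
    intro pre seen hlen hseen hpre
    have hit : 2 ≤ item.length := hlen item (by simp)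
    set a := item.getD 0 0 with ha
    set b := item.getD 1 0 with hb
    have hedges : pvEdges (item :: rest) = (a, b) :: pvEdges rest := by
      simp [pvEdges, ha, hb]
    have hseen' : ∀ x, x ∈ PySem.Set.add seen (a, b) ↔ x ∈ pre ++ [(a, b)] := by
      intro x
      rw [PySem.Set.mem_add]
      simp [hseen x]
    rw [solveAltGo_cons item rest seen a b (pvGet_row0 item hit) (pvGet_row1 item hit)]
    by_cases hc : PySem.Set.contains (PySem.Set.add seen (a, b)) (b, a) = true
    · rw [if_pos hc]
      have hba : (b, a) ∈ pre ++ [(a, b)] :=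
        (hseen' _).mp ((PySem.Set.contains_iff _ _).mp hc)
      have : pvBad (pre ++ pvEdges (item :: rest)) = true := by
        rw [pvBad_iff]
        refine ⟨a, b, ?_, ?_⟩
        · rw [hedges]; simp
        · rw [hedges]
          rcases List.mem_append.mp hba with h | h
          · exact List.mem_append.mpr (Or.inl h)
          · simp at h
            refine List.mem_append.mpr (Or.inr ?_)
            rw [h.1, h.2]; simp
      simp [this]
    · rw [if_neg hc]
      have hnotmem : (b, a) ∉ pre ++ [(a, b)] := fun h =>
        hc ((PySem.Set.contains_iff _ _).mpr ((hseen' _).mpr h))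
      have hpre' : pvBad (pre ++ [(a, b)]) = false := by
        by_contra h
        rw [Bool.not_eq_false, pvBad_iff] at h
        obtain ⟨x, y, hxy, hyx⟩ := h
        rcases List.mem_append.mp hxy with hx | hx
        · rcases List.mem_append.mp hyx with hy | hy
          · have : pvBad pre = true := (pvBad_iff pre).mpr ⟨x, y, hx, hy⟩
            rw [hpre] at this; exact Bool.false_ne_true this
          · simp at hy
            obtain ⟨hy1, hy2⟩ := hy
            subst hy1; subst hy2
            exact hnotmem (List.mem_append.mpr (Or.inl hx))
        · simp at hx
          obtain ⟨hx1, hx2⟩ := hx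
          subst hx1; subst hx2
          exact hnotmem hyx
      have := ih (pre ++ [(a, b)]) (PySem.Set.add seen (a, b))
        (fun it h => hlen it (by simp [h])) hseen' hpre'
      rw [this, hedges]
      simp

theorem solve_alt_eq (n : Int) (ps : List (List Int)) (h : Pre_solve n ps) :
    solve_alt n ps = !pvBad (pvEdges ps) := by
  have := solveAltGo_inv ps [] PySem.Set.empty h (by simp [PySem.Set.empty]) (by simp [pvBad])
  simpa [solve_alt] using this

-- ===== side A =====

-- the fold body of A, rewritten over the extracted (key = course, value-entry = prereq) pairs
theorem solve_fold_eq (ps : List (List Int)) :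
    ∀ (d : PySem.Dict Int (List Int)), (∀ it ∈ ps, 2 ≤ it.length) →
    ps.foldl solveStep d
    = ((pvEdges ps).map (fun e => (e.2, e.1))).foldl
        (fun d p => d.modify p.1 [] (fun l => l ++ [p.2])) d := by
  induction ps with
  | nil => intro d _; rfl
  | cons item ps ih =>
    intro d hlen
    have hit : 2 ≤ item.length := hlen item (by simp)
    have hstep : solveStep d item = d.modify (item.getD 1 0) [] (fun l => l ++ [item.getD 0 0]) := by
      rw [solveStep, pvGet_row1 item hit, pvGet_row0 item hit]
    simp only [List.foldl_cons, pvEdges, List.map_cons, hstep]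
    exact ih _ (fun it h => hlen it (by simp [h]))

theorem solve_eq (n : Int) (ps : List (List Int)) (h : Pre_solve n ps) :
    solve n ps = !pvBad (pvEdges ps) := by
  unfold solve
  rw [solve_fold_eq ps PySem.Dict.empty h]
  unfold solveScan
  set pl := (pvEdges ps).map (fun e : Int × Int => (e.2, e.1)) with hpl
  set d := pl.foldl (fun d p => d.modify p.1 [] (fun l => l ++ [p.2])) PySem.Dict.empty with hd
  have hnd : d.keys.Nodup := by
    rw [hd]
    exact PySem.Dict.nodup_keys_foldl_modify_key pl (fun p => p.1) [] (fun d p l => l ++ [p.2])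
      PySem.Dict.empty (by simp [PySem.Dict.keys_empty])
  have hgetD : ∀ c, d.getD c [] = (pl.filter (fun p => p.1 == c)).map (fun p => p.2) := by
    intro c
    rw [hd, PySem.Dict.getD_foldl_modify_append, PySem.Dict.getD_empty]
    simp
  have hmem_getD : ∀ x c, x ∈ d.getD c [] ↔ (x, c) ∈ pvEdges ps := by
    intro x c
    rw [hgetD]
    simp only [List.mem_map, List.mem_filter, hpl, beq_iff_eq]
    constructor
    · rintro ⟨p, ⟨⟨e, he, rfl⟩, h1⟩, h2⟩
      simp at h1 h2
      rwa [← h1, ← h2, Prod.mk.eta]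
    · intro hx
      exact ⟨(c, x), ⟨⟨(x, c), hx, rfl⟩, rfl⟩, rfl⟩
  have hkeys : ∀ c, c ∈ d.keys ↔ ∃ x, (x, c) ∈ pvEdges ps := by
    intro c
    rw [hd, PySem.Dict.keys_foldl_modify_key]
    rw [show PySem.Dict.empty.keys = ([] : List Int) from by simp [PySem.Dict.keys_empty]]
    rw [show PySem.Set.update [] (pl.map (fun p => p.1)) = PySem.Set.ofList (pl.map (fun p => p.1)) from
      PySem.Set.update_nil_left _]
    rw [PySem.Set.mem_ofList]
    simp only [hpl, List.mem_map]
    constructor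
    · rintro ⟨p, ⟨e, he, rfl⟩, rfl⟩; exact ⟨e.1, by simpa using he⟩
    · rintro ⟨x, hx⟩; exact ⟨(c, x), ⟨(x, c), hx, rfl⟩, rfl⟩
  have hcontains : ∀ c, d.contains c = true ↔ ∃ x, (x, c) ∈ pvEdges ps := by
    intro c; rw [PySem.Dict.contains_iff_mem_keys]; exact hkeys c
  congr 1
  rw [Bool.eq_iff_iff]

  rw [PySem.Dict.items_eq_map_keys d hnd []]
  simp only [List.any_map, List.any_eq_true, pvBad_iff, Function.comp]
  constructor
  · rintro ⟨b, hb, hin⟩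
    simp only [List.any_eq_true, Bool.and_eq_true, List.contains_iff_mem] at hin
    obtain ⟨a, ha, _, hba⟩ := hin
    exact ⟨a, b, (hmem_getD a b).mp ha, (hmem_getD b a).mp hba⟩
  · rintro ⟨a, b, hab, hba⟩
    refine ⟨b, (hkeys b).mpr ⟨a, hab⟩, ?_⟩
    simp only [List.any_eq_true, Bool.and_eq_true, List.contains_iff_mem]
    exact ⟨a, (hmem_getD a b).mpr hab,
      (hcontains a).mpr ⟨b, hba⟩, (hmem_getD b a).mpr hba⟩

-- ===== VERDICT (by name: the statement is the Claim_ definition above) =====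
theorem solve_spec : Claim_equal_solve := by
  intro n ps _ hpre
  unfold Spec_solve
  rw [solve_eq n ps hpre, solve_alt_eq n ps hpre]
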